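-- pv_equiv track=rewrite | github.com/iproby/networktestby_mac | mac_net_watch.py | extract_interface_block
-- ===== SOURCE A (Python) =====
-- def extract_interface_block(ifconfig_output: str, interface_name: str) -> str:
--     lines = ifconfig_output.splitlines()
--     collecting = False
--     block: list[str] = []
--     prefix = f"{interface_name}:"
--
--     for line in lines:
--         if not line.startswith("\t") and line.startswith(prefix):
--             collecting = True
--             block.append(line)
--             continue
--         if collecting and not line.startswith("\t"):
--             break
--         if collecting:
--             block.append(line)
--
--     return "\n".join(block)
-- ===== SOURCE B (Python) =====
-- from itertools import chain, dropwhile, takewhile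
--
--
-- def extract_interface_block(ifconfig_output: str, interface_name: str) -> str:
--     prefix = f"{interface_name}:"
--     lines = ifconfig_output.splitlines()
--     # Phase 1: group lines into blocks; each block is one line plus the
--     # run of tab-indented continuation lines that follows it.
--     blocks = []
--     i = 0
--     while i < len(lines):
--         j = i + 1
--         while j < len(lines) and lines[j].startswith("\t"):
--             j += 1
--         blocks.append(lines[i:j])
--         i = j
--
--     # Phase 2: the answer is the consecutive run of blocks whose header
--     # matches the interface prefix (consecutive matching headers merge).
--     def matches(b):
--         return not b[0].startswith("\t") and b[0].startswith(prefix)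
--
--     run = takewhile(matches, dropwhile(lambda b: not matches(b), blocks))
--     return "\n".join(chain.from_iterable(run))
-- ===== Notes on version B (the rewrite author's own statement) =====
-- stated objective: alternative
-- what changed: Groups the lines into header+continuation blocks first and then selects the consecutive run of blocks whose headers match the interface prefix, instead of A's single per-line collecting-flag state machine.
import Mathlib
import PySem

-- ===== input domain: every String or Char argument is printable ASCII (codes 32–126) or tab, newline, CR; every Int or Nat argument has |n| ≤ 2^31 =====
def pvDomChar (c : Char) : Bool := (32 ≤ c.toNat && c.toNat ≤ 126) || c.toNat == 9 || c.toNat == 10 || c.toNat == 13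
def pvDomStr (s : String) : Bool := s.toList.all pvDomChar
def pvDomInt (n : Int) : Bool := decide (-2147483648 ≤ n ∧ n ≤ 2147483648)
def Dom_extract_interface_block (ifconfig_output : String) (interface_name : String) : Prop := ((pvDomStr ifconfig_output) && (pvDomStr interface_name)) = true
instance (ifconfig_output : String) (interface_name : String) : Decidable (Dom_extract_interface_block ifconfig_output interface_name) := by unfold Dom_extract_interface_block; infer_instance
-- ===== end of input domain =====

-- B groups the lines into header+continuation blocks first and then selects the consecutive
-- run of blocks whose headers match the interface prefix, instead of A's per-line
-- collecting-flag state machine (alternative decomposition, same cost).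

-- ===== PORT A =====
-- A's for-loop with `collecting`, `block` and `break`, as structural recursion over the lines.
def extract_interface_block_loop (prefixStr : String) : List String → Bool → List String → List String
  | [], _, block => block
  | line :: rest, collecting, block =>
    if !(PySem.Str.startswith line "\t") && PySem.Str.startswith line prefixStr then
      extract_interface_block_loop prefixStr rest true (block ++ [line])
    else if collecting && !(PySem.Str.startswith line "\t") then
      block
    else if collecting then
      extract_interface_block_loop prefixStr rest collecting (block ++ [line])
    else
      extract_interface_block_loop prefixStr rest collecting block

def extract_interface_block (ifconfig_output : String) (interface_name : String) : String :=
  let lines := PySem.Str.splitlines ifconfig_output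
  let prefixStr := interface_name ++ ":"
  PySem.Str.join "\n" (extract_interface_block_loop prefixStr lines false [])

-- ===== PORT B =====
-- Source B phase 1: group the lines into blocks, each block = one line plus the run of
-- tab-indented continuation lines that follows it.
def pvChunks (t : String → Bool) : List String → List (List String)
  | [] => []
  | l :: rest => (l :: rest.takeWhile t) :: pvChunks t (rest.dropWhile t)
  termination_by ls => ls.length
  decreasing_by simpa using Nat.lt_succ_of_le (List.length_dropWhile_le t rest)

-- Source B `matches`: the block's header line is unindented and carries the prefix.
def pvMatches (t : String → Bool) (prefixStr : String) : List String → Bool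
  | [] => false
  | h :: _ => !(t h) && PySem.Str.startswith h prefixStr

def extract_interface_block_alt (ifconfig_output : String) (interface_name : String) : String :=
  let prefixStr := interface_name ++ ":"
  let lines := PySem.Str.splitlines ifconfig_output
  let tab := fun (l : String) => PySem.Str.startswith l "\t"
  let blocks := pvChunks tab lines
  let run := (blocks.dropWhile (fun b => !(pvMatches tab prefixStr b))).takeWhile (pvMatches tab prefixStr)
  PySem.Str.join "\n" run.flatten

-- ===== PRECONDITION & SPEC =====
def Spec_extract_interface_block (ifconfig_output : String) (interface_name : String) (out : String) : Prop := out = extract_interface_block_alt ifconfig_output interface_name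
instance (ifconfig_output : String) (interface_name : String) (out : String) : Decidable (Spec_extract_interface_block ifconfig_output interface_name out) := by unfold Spec_extract_interface_block; infer_instance

-- ===== CLAIM (what is proved, stated in full; the proofs are below) =====
def Claim_equal_extract_interface_block : Prop := ∀ (ifconfig_output : String) (interface_name : String), Dom_extract_interface_block ifconfig_output interface_name → Spec_extract_interface_block ifconfig_output interface_name (extract_interface_block ifconfig_output interface_name)

-- ===== LEMMAS AND PROOFS =====

-- Both sides are shown equal to this normal form: find the first matching header line,
-- then takeWhile (tab or prefix) from there.
def pvRHS (t q : String → Bool) (ls : List String) : List String :=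
  match ls.findIdx? (fun l => !(t l) && q l) with
  | none => []
  | some i => (ls.drop i).takeWhile (fun l => t l || q l)

-- ---- A side ----
theorem loop_collecting (p : String) (lines : List String) (block : List String) :
    extract_interface_block_loop p lines true block
      = block ++ lines.takeWhile
          (fun l => PySem.Str.startswith l "\t" || PySem.Str.startswith l p) := by
  induction lines generalizing block with
  | nil => simp [extract_interface_block_loop]
  | cons line rest ih =>
    cases ht : PySem.Str.startswith line "\t" <;> cases hq : PySem.Str.startswith line p <;>
      simp only [extract_interface_block_loop, List.takeWhile, ht, hq, Bool.not_true,
        Bool.not_false, Bool.and_true, Bool.and_false, Bool.true_and, Bool.or_true,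
        Bool.or_false, if_true, ih] <;> simp

theorem loop_search (p : String) (lines : List String) :
    extract_interface_block_loop p lines false []
      = pvRHS (fun l => PySem.Str.startswith l "\t") (fun l => PySem.Str.startswith l p) lines := by
  induction lines with
  | nil => rfl
  | cons line rest ih =>
    cases ht : PySem.Str.startswith line "\t" <;> cases hq : PySem.Str.startswith line p
    · simp only [extract_interface_block_loop, pvRHS, List.findIdx?_cons, ht, hq,
        Bool.not_false, Bool.and_false, Bool.false_eq_true, if_false] at ih ⊢
      rw [ih]; cases hfind : rest.findIdx?
        (fun l => !(PySem.Str.startswith l "\t") && PySem.Str.startswith l p) <;> simp [hfind]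
    · simp only [extract_interface_block_loop, pvRHS, List.findIdx?_cons, ht, hq,
        Bool.not_false, Bool.and_true, if_true, loop_collecting]
      simp only [PySem.Str.startswith] at ht hq
      simp [ht, hq, List.takeWhile]
    · simp only [extract_interface_block_loop, pvRHS, List.findIdx?_cons, ht, hq,
        Bool.not_true, Bool.and_false, Bool.false_eq_true, if_false] at ih ⊢
      rw [ih]; cases hfind : rest.findIdx?
        (fun l => !(PySem.Str.startswith l "\t") && PySem.Str.startswith l p) <;> simp [hfind]
    · simp only [extract_interface_block_loop, pvRHS, List.findIdx?_cons, ht, hq,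
        Bool.not_true, Bool.and_true, Bool.false_eq_true, if_false] at ih ⊢
      rw [ih]; cases hfind : rest.findIdx?
        (fun l => !(PySem.Str.startswith l "\t") && PySem.Str.startswith l p) <;> simp [hfind]

-- ---- B side ----
theorem takeWhile_split (t p : String → Bool) (hpt : ∀ x, t x = true → p x = true) (ls : List String) :
    ls.takeWhile p = ls.takeWhile t ++ (ls.dropWhile t).takeWhile p := by
  induction ls with
  | nil => rfl
  | cons x xs ih =>
    cases hx : t x with
    | true => simp [List.takeWhile, List.dropWhile, hx, hpt x hx, ih]
    | false => simp [List.takeWhile, List.dropWhile, hx]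

theorem rhs_skip (t q : String → Bool) (x : String) (hx : (!(t x) && q x) = false) (ls : List String) :
    pvRHS t q (x :: ls) = pvRHS t q ls := by
  simp only [pvRHS, List.findIdx?_cons, hx, Bool.false_eq_true, if_false]
  cases hfind : ls.findIdx? (fun l => !(t l) && q l) <;> simp [hfind]

theorem rhs_dropWhile (t q : String → Bool) (ls : List String) :
    pvRHS t q ls = pvRHS t q (ls.dropWhile t) := by
  induction ls with
  | nil => rfl
  | cons x xs ih =>
    cases hx : t x with
    | true =>
      rw [List.dropWhile_cons_of_pos (by simp [hx]), rhs_skip t q x (by simp [hx])]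
      exact ih
    | false => rw [List.dropWhile_cons_of_neg (by simp [hx])]

theorem head_dropWhile (t : String → Bool) (ls : List String) (x : String)
    (hx : (ls.dropWhile t).head? = some x) : t x = false := by
  induction ls with
  | nil => simp [List.dropWhile] at hx
  | cons y ys ih =>
    by_cases hy : t y = true
    · rw [List.dropWhile_cons_of_pos (by simp [hy])] at hx; exact ih hx
    · rw [List.dropWhile_cons_of_neg (by simpa using hy)] at hx
      simp at hx; subst hx; simpa using hy

theorem chunks_run (t : String → Bool) (p : String) (ls : List String)
    (hhead : ∀ x, ls.head? = some x → t x = false) :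
    ((pvChunks t ls).takeWhile (pvMatches t p)).flatten
      = ls.takeWhile (fun l => t l || PySem.Str.startswith l p) := by
  induction ls using pvChunks.induct (t := t) with
  | case1 => simp [pvChunks]
  | case2 l rest ih =>
    have hl : t l = false := hhead l rfl
    rw [pvChunks]
    cases hq : PySem.Str.startswith l p with
    | false =>
      simp only [PySem.Str.startswith] at hq
      rw [List.takeWhile_cons_of_neg (by simp [pvMatches, PySem.Str.startswith, hl, hq]),
        List.takeWhile_cons_of_neg (by simp [PySem.Str.startswith, hl, hq])]
      simp
    | true =>
      simp only [PySem.Str.startswith] at hq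
      rw [List.takeWhile_cons_of_pos (by simp [pvMatches, PySem.Str.startswith, hl, hq]),
        List.takeWhile_cons_of_pos (by simp [PySem.Str.startswith, hl, hq])]
      have ihr := ih (fun x hx => head_dropWhile t rest x hx)
      simp only [List.flatten_cons, ihr, List.cons_append, List.cons.injEq, true_and]
      exact (takeWhile_split t _ (fun x hx => by simp [hx]) rest).symm

theorem chunks_select (t : String → Bool) (p : String) (ls : List String) :
    (((pvChunks t ls).dropWhile (fun b => !(pvMatches t p b))).takeWhile
        (pvMatches t p)).flatten = pvRHS t (fun l => PySem.Str.startswith l p) ls := by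
  induction ls using pvChunks.induct (t := t) with
  | case1 => simp [pvChunks, pvRHS]
  | case2 l rest ih =>
    rw [pvChunks]
    cases hl : t l with
    | true =>
      rw [List.dropWhile_cons_of_pos (by simp [pvMatches, hl]),
        rhs_skip t _ l (by simp [hl]), rhs_dropWhile t _ rest]
      exact ih
    | false =>
      cases hq : PySem.Str.startswith l p with
      | true =>
        simp only [PySem.Str.startswith] at hq
        rw [List.dropWhile_cons_of_neg (by simp [pvMatches, PySem.Str.startswith, hl, hq])]
        have hrun := chunks_run t p (l :: rest) (by intro x hx; simp at hx; subst hx; exact hl)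
        rw [pvChunks] at hrun
        rw [hrun]
        simp [pvRHS, List.findIdx?_cons, PySem.Str.startswith, hl, hq]
      | false =>
        simp only [PySem.Str.startswith] at hq
        rw [List.dropWhile_cons_of_pos (by simp [pvMatches, PySem.Str.startswith, hl, hq]),
          rhs_skip t _ l (by simp [PySem.Str.startswith, hl, hq]), rhs_dropWhile t _ rest]
        exact ih

-- ===== VERDICT (by name: the statement is the Claim_ definition above) =====
theorem extract_interface_block_spec : Claim_equal_extract_interface_block := by
  intro s name _
  unfold Spec_extract_interface_block
  simp only [extract_interface_block, extract_interface_block_alt]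
  rw [loop_search, chunks_select]
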